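-- pv_equiv track=rewrite | github.com/bingual/Programmers | 프로그래머스/1/159994. 카드 뭉치/카드 뭉치.py | solution
-- ===== SOURCE A (Python) =====
-- def solution(cards1, cards2, goal):
--     combos = []
--     # cards1[i] or cards2[i] == goal[i] 라면
--     # 해당 배열의 가장 첫 번째 요소를 지우고 배열에 삽입
--     for a in goal:
--         if a in cards1:
--             pop = cards1.pop(0)
--             combos.append(pop)
--         if a in cards2:
--             pop = cards2.pop(0)
--             combos.append(pop)
--     # 과정을 전부 수행 했을때 combos와 goal을 비교후 결과 반환
--     answer = "Yes" if combos == goal else "No"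
--     return answer
-- ===== SOURCE B (Python) =====
-- def solution(cards1, cards2, goal):
--     # Counters of remaining elements + front indices: O(N+M) instead of A's
--     # O(N*M) membership scans and pop(0) shifts.  (A mutates cards1/cards2 in
--     # place; B does not -- the return value is identical.)
--     cnt1 = {}
--     for x in cards1:
--         cnt1[x] = cnt1.get(x, 0) + 1
--     cnt2 = {}
--     for x in cards2:
--         cnt2[x] = cnt2.get(x, 0) + 1
--     i1 = 0
--     i2 = 0
--     combos = []
--     for a in goal:
--         if cnt1.get(a, 0) > 0:
--             p = cards1[i1]
--             i1 += 1
--             cnt1[p] = cnt1.get(p, 0) - 1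
--             combos.append(p)
--         if cnt2.get(a, 0) > 0:
--             p = cards2[i2]
--             i2 += 1
--             cnt2[p] = cnt2.get(p, 0) - 1
--             combos.append(p)
--     return "Yes" if combos == goal else "No"
-- ===== Notes on version B (the rewrite author's own statement) =====
-- stated objective: faster
-- what changed: Replaces per-goal-element linear membership scans and O(n) pop(0) shifts on the mutating decks with precomputed element counters plus front indices over the unchanged decks, giving one pass per list; B does not mutate cards1/cards2 (return value identical).
import Mathlib
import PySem

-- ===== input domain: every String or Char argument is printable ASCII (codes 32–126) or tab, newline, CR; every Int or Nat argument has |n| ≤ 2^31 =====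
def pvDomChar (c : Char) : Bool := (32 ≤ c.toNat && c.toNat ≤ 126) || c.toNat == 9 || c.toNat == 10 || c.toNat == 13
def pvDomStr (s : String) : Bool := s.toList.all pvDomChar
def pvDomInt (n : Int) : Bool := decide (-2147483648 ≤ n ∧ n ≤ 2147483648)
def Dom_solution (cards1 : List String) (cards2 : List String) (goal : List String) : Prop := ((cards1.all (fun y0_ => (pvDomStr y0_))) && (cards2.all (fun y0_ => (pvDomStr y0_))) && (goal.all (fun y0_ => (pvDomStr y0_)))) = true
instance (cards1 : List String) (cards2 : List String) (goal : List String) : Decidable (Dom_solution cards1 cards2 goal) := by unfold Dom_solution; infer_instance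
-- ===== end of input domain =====

-- B replaces A's per-goal-element membership scans and pop(0) shifts with
-- precomputed counters + front indices (one pass per list).  A mutates
-- cards1/cards2 in place, B does not; the equivalence is about the return value.

-- ===== PORT A =====
-- one iteration of A's `for a in goal` body for one deck:
-- `if a in c: pop = c.pop(0); combos.append(pop)` (pop(0) on a list known
-- nonempty because `a in c`; head/tail is exact there)
def stepA (c : List String) (combos : List String) (a : String) : List String × List String :=
  if c.contains a then (c.tail, combos ++ [c.headD ""]) else (c, combos)

def loopA (c1 c2 combos : List String) : List String → List String
  | [] => combos
  | a :: rest =>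
      let r1 := stepA c1 combos a
      let r2 := stepA c2 r1.2 a
      loopA r1.1 r2.1 r2.2 rest

def solution (cards1 : List String) (cards2 : List String) (goal : List String) : String :=
  if loopA cards1 cards2 [] goal = goal then "Yes" else "No"

-- ===== PORT B =====
-- one iteration of B's loop body for one deck: counter lookup, front index,
-- counter decrement
def stepB (full : List String) (i : Int) (d : PySem.Dict String Int)
    (combos : List String) (a : String) : Int × PySem.Dict String Int × List String :=
  if d.getD a 0 > 0 then
    let p := PySem.List.pyGetD full i ""
    (i + 1, d.insert p (d.getD p 0 - 1), combos ++ [p])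
  else (i, d, combos)

def loopB (full1 full2 : List String) (i1 i2 : Int)
    (d1 d2 : PySem.Dict String Int) (combos : List String) : List String → List String
  | [] => combos
  | a :: rest =>
      let r1 := stepB full1 i1 d1 combos a
      let r2 := stepB full2 i2 d2 r1.2.2 a
      loopB full1 full2 r1.1 r2.1 r1.2.1 r2.2.1 r2.2.2 rest

def solution_alt (cards1 : List String) (cards2 : List String) (goal : List String) : String :=
  let d1 := cards1.foldl (fun d x => d.insert x (d.getD x 0 + 1)) PySem.Dict.empty
  let d2 := cards2.foldl (fun d x => d.insert x (d.getD x 0 + 1)) PySem.Dict.empty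
  if loopB cards1 cards2 0 0 d1 d2 [] goal = goal then "Yes" else "No"

-- ===== PRECONDITION & SPEC =====
def Spec_solution (cards1 : List String) (cards2 : List String) (goal : List String) (out : String) : Prop := out = solution_alt cards1 cards2 goal
instance (cards1 : List String) (cards2 : List String) (goal : List String) (out : String) : Decidable (Spec_solution cards1 cards2 goal out) := by unfold Spec_solution; infer_instance

-- ===== CLAIM (what is proved, stated in full; the proofs are below) =====
def Claim_equal_solution : Prop := ∀ (cards1 : List String) (cards2 : List String) (goal : List String), Dom_solution cards1 cards2 goal → Spec_solution cards1 cards2 goal (solution cards1 cards2 goal)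

-- ===== LEMMAS AND PROOFS =====

-- invariant: d is the counter of the part of `full` not yet popped (from n on)
def CntInv (full : List String) (n : Nat) (d : PySem.Dict String Int) : Prop :=
  ∀ x, d.getD x 0 = ((full.drop n).count x : Int)

lemma stepB_simulates (full : List String) (n : Nat) (d : PySem.Dict String Int)
    (combos : List String) (a : String) (h : CntInv full n d) :
    ∃ n' : Nat,
      stepB full (n : Int) d combos a
        = ((n' : Int), (stepB full (n : Int) d combos a).2.1, (stepA (full.drop n) combos a).2)
      ∧ (stepA (full.drop n) combos a).1 = full.drop n'
      ∧ CntInv full n' (stepB full (n : Int) d combos a).2.1 := by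
  have hmem : (0 < d.getD a 0) ↔ (full.drop n).contains a = true := by
    rw [h a, List.contains_iff_mem]
    exact_mod_cast List.count_pos_iff
  by_cases hc : (full.drop n).contains a = true
  · -- pop: drop n = p :: tail
    have hne : full.drop n ≠ [] := by
      intro he; rw [he] at hc; simp at hc
    obtain ⟨p, t, hpt⟩ := List.exists_cons_of_ne_nil hne
    have hmem' : a = p ∨ a ∈ t := by
      have := hc; rw [hpt] at this; simpa using this
    have hget : PySem.List.pyGetD full (n : Int) "" = p := by
      have h0 : full[n]? = some p := by
        have := congrArg (fun l => l[0]?) hpt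
        simpa [List.getElem?_drop] using this
      simp [PySem.List.pyGetD_natCast, List.getD, h0]
    have htail : full.drop (n + 1) = t := by
      have := congrArg List.tail hpt
      simpa [List.tail_drop] using this
    refine ⟨n + 1, ?_, ?_, ?_⟩
    · simp [stepB, stepA, hmem.mpr hc, hget, hpt, hmem']
    · simp [stepA, hpt, htail, hmem']
    · intro x
      simp only [stepB, if_pos (hmem.mpr hc), hget]
      rw [PySem.Dict.getD_insert]
      by_cases hx : x = p
      · subst hx
        rw [if_pos rfl, h x, htail, hpt]
        simp
      · rw [if_neg hx, h x, htail, hpt,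
          List.count_cons_of_ne (by exact fun he => hx he.symm)]
  · -- no pop
    have hnot : ¬ (0 < d.getD a 0) := fun h0 => hc (hmem.mp h0)
    have hmem' : ¬ a ∈ full.drop n := by simpa [List.contains_iff_mem] using hc
    refine ⟨n, ?_, ?_, ?_⟩
    · simp [stepB, stepA, hnot, hmem']
    · simp [stepA, hmem']
    · intro x; simpa [stepB, hnot] using h x

lemma loop_eq (goal : List String) : ∀ (full1 full2 : List String) (n1 n2 : Nat)
    (d1 d2 : PySem.Dict String Int) (combos : List String),
    CntInv full1 n1 d1 → CntInv full2 n2 d2 →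
    loopB full1 full2 (n1 : Int) (n2 : Int) d1 d2 combos goal
      = loopA (full1.drop n1) (full2.drop n2) combos goal := by
  induction goal with
  | nil => intro _ _ _ _ _ _ _ _ _; simp [loopA, loopB]
  | cons a rest ih =>
    intro full1 full2 n1 n2 d1 d2 combos h1 h2
    obtain ⟨n1', he1, ha1, hi1⟩ := stepB_simulates full1 n1 d1 combos a h1
    obtain ⟨n2', he2, ha2, hi2⟩ :=
      stepB_simulates full2 n2 d2 (stepA (full1.drop n1) combos a).2 a h2
    simp only [loopA, loopB]
    rw [he1]
    simp only
    rw [he2]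
    simp only
    rw [ha1, ha2, ih full1 full2 n1' n2' _ _ _ hi1 hi2]

lemma counter_init (full : List String) :
    CntInv full 0 (full.foldl (fun d x => d.insert x (d.getD x 0 + 1)) PySem.Dict.empty) := by
  intro x
  rw [PySem.Dict.getD_foldl_insert_add_one]
  simp

-- ===== VERDICT (by name: the statement is the Claim_ definition above) =====
theorem solution_spec : Claim_equal_solution := by
  intro cards1 cards2 goal _
  unfold Spec_solution solution solution_alt
  have := loop_eq goal cards1 cards2 0 0 _ _ []
    (counter_init cards1) (counter_init cards2)
  simp only [Nat.cast_zero, List.drop_zero] at this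
  show (if loopA cards1 cards2 [] goal = goal then "Yes" else "No")
      = (if loopB cards1 cards2 0 0
            (cards1.foldl (fun d x => d.insert x (d.getD x 0 + 1)) PySem.Dict.empty)
            (cards2.foldl (fun d x => d.insert x (d.getD x 0 + 1)) PySem.Dict.empty)
            [] goal = goal then "Yes" else "No")
  rw [this]
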